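-- pv_equiv track=rewrite | github.com/paulovitornovaes/Prog1 | av2/3.py | pegaStr
-- ===== SOURCE A (Python) =====
-- def pegaStr(str):
--     tratamentoString = str.split()  # o tratamento é simples, estou aplicando split para separar
--     iniciais = ""  # Eu acredito que o "elemento neutro da string seja "" do mesmo jeito que o elemento neutro da soma é zero...
--     c = 0  # Vou usar como contador
--     for i in range(len(tratamentoString)):
--         iniciais += tratamentoString[c][0]  # estou usando o contador para pegar a primeira palavra e o 0 é a primeira letra ex: Paulo Vitor (paulo é o contador no zero e P é o zero, como toda letra inicia no zero, deixo ele fixo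
--         c += 1  # tenho que sempre adicionar + 1 no contador para pegar a proxima palavra
--     return iniciais
-- ===== SOURCE B (Python) =====
-- def pegaStr(str):
--     # Single pass over the characters: emit a char when it starts a word
--     # (non-space preceded by space/start of string); no split(), no word list.
--     iniciais = []
--     prev_space = True
--     for ch in str:
--         if not ch.isspace() and prev_space:
--             iniciais.append(ch)
--         prev_space = ch.isspace()
--     return "".join(iniciais)
-- ===== Notes on version B (the rewrite author's own statement) =====
-- stated objective: alternative
-- what changed: Replaces split() plus an indexed loop over the word list with a single character scan carrying a previous-was-whitespace flag that emits each word's first character directly.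
import Mathlib
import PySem

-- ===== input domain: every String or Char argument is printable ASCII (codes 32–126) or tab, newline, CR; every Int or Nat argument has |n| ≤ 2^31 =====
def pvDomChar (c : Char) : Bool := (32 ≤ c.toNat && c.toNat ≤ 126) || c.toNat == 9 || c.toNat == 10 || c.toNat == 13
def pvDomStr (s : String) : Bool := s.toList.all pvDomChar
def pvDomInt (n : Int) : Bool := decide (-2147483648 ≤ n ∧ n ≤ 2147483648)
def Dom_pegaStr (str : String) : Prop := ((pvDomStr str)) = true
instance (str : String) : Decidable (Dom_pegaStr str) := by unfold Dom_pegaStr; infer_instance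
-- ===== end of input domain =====

-- B replaces split()+indexed loop by a single character scan with a previous-was-whitespace flag (alternative decomposition, same cost).


-- ===== PORT A =====
-- A: split the string, then loop i over range(len(words)) with a counter c, appending words[c][0].
-- The pyGet? defaults are never reached: c stays in range and split() words are nonempty.
def pegaStr (str : String) : String :=
  let tratamentoString := PySem.Chars.split₀ str.toList
  let st := (PySem.List.pyRange 0 (tratamentoString.length : Int) 1).foldl
    (fun (st : List Char × Int) _i =>
      let w := (PySem.List.pyGet? tratamentoString st.2).getD []
      (st.1 ++ [(PySem.List.pyGet? w 0).getD ' '], st.2 + 1))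
    ([], 0)
  String.mk st.1

-- ===== PORT B =====
-- B: one pass over the characters; emit a char iff it is non-space and the previous char was
-- space (or start).  "".join of 1-char strings is String.mk of the collected chars.
def pegaStr_alt (str : String) : String :=
  let st := str.toList.foldl
    (fun (st : List Char × Bool) ch =>
      (if !(PySem.Chars.isspace ch) && st.2 then st.1 ++ [ch] else st.1,
       PySem.Chars.isspace ch))
    ([], true)
  String.mk st.1

-- ===== PRECONDITION & SPEC =====
def Spec_pegaStr (str : String) (out : String) : Prop := out = pegaStr_alt str
instance (str : String) (out : String) : Decidable (Spec_pegaStr str out) := by unfold Spec_pegaStr; infer_instance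

-- ===== CLAIM (what is proved, stated in full; the proofs are below) =====
def Claim_equal_pegaStr : Prop := ∀ (str : String), Dom_pegaStr str → Spec_pegaStr str (pegaStr str)

-- ===== LEMMAS AND PROOFS =====

-- accumulator law for split₀'s worker
theorem go_acc (s cur acc) :
    PySem.Chars.split₀.go s cur acc = acc.reverse ++ PySem.Chars.split₀.go s cur [] := by
  induction s generalizing cur acc with
  | nil => simp [PySem.Chars.split₀.go]; split_ifs <;> simp
  | cons c rest ih =>
    simp only [PySem.Chars.split₀.go]
    split_ifs with h1 h2
    · exact ih [] acc
    · rw [ih [] (cur.reverse :: acc), ih [] [cur.reverse]]; simp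
    · exact ih _ _

-- every word produced by split₀ is nonempty
theorem words_ne (s : List Char) : ∀ cur acc, (∀ w ∈ acc, w ≠ []) →
    ∀ w ∈ PySem.Chars.split₀.go s cur acc, w ≠ [] := by
  induction s with
  | nil =>
    intro cur acc hacc w hw
    simp only [PySem.Chars.split₀.go] at hw
    split_ifs at hw with h
    · exact hacc w (List.mem_reverse.1 hw)
    · rcases List.mem_cons.1 (List.mem_reverse.1 hw) with h' | h'
      · rw [h']; simp [List.isEmpty_iff] at h; simp [h]
      · exact hacc w h'
  | cons c rest ih =>
    intro cur acc hacc w hw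
    simp only [PySem.Chars.split₀.go] at hw
    split_ifs at hw with h1 h2
    · exact ih [] acc hacc w hw
    · refine ih [] (cur.reverse :: acc) ?_ w hw
      intro v hv
      rcases List.mem_cons.1 hv with hv | hv
      · rw [hv]; simp [List.isEmpty_iff] at h2; simp [h2]
      · exact hacc v hv
    · exact ih (c :: cur) acc hacc w hw

-- the first word of split₀'s worker extends cur.reverse
theorem go_first (s : List Char) : ∀ cur, cur ≠ [] →
    ∃ t rest, PySem.Chars.split₀.go s cur [] = (cur.reverse ++ t) :: rest := by
  induction s with
  | nil =>
    intro cur h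
    exact ⟨[], [], by simp [PySem.Chars.split₀.go, List.isEmpty_iff, h]⟩
  | cons c rest ih =>
    intro cur h
    simp only [PySem.Chars.split₀.go]
    split_ifs with h1 h2
    · exact absurd (List.isEmpty_iff.1 h2) h
    · exact ⟨[], PySem.Chars.split₀.go rest [] [], by rw [go_acc]; simp⟩
    · obtain ⟨t, r, ht⟩ := ih (c :: cur) (by simp)
      exact ⟨c :: t, r, by simpa using ht⟩

-- B's scan computes the heads of split₀'s words
theorem scanB (s : List Char) :
    (∀ acc : List Char,
      (s.foldl (fun (st : List Char × Bool) ch =>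
        (if !(PySem.Chars.isspace ch) && st.2 then st.1 ++ [ch] else st.1,
         PySem.Chars.isspace ch)) (acc, true)).1
        = acc ++ (PySem.Chars.split₀.go s [] []).map List.headI)
    ∧ (∀ (acc cur : List Char), cur ≠ [] →
      (s.foldl (fun (st : List Char × Bool) ch =>
        (if !(PySem.Chars.isspace ch) && st.2 then st.1 ++ [ch] else st.1,
         PySem.Chars.isspace ch)) (acc, false)).1
        = acc ++ ((PySem.Chars.split₀.go s cur []).map List.headI).tail) := by
  induction s with
  | nil =>
    refine ⟨fun acc => by simp [PySem.Chars.split₀.go], fun acc cur h => ?_⟩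
    simp [PySem.Chars.split₀.go, List.isEmpty_iff, h]
  | cons c rest ih =>
    constructor
    · intro acc
      by_cases hc : PySem.Chars.isspace c
      · rw [List.foldl_cons, hc]
        rw [if_neg (show ¬ ((!true && true) = true) by decide)]
        rw [ih.1 acc]
        simp [PySem.Chars.split₀.go, hc]
      · obtain ⟨t, r, ht⟩ := go_first rest [c] (by simp)
        have hcf : PySem.Chars.isspace c = false := by simp [hc]
        rw [List.foldl_cons, hcf]
        rw [if_pos (show (!false && true) = true by decide)]
        rw [ih.2 (acc ++ [c]) [c] (by simp)]
        simp only [PySem.Chars.split₀.go, hcf, Bool.false_eq_true, if_false, ht]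
        simp
    · intro acc cur h
      by_cases hc : PySem.Chars.isspace c
      · rw [List.foldl_cons, hc]
        rw [if_neg (show ¬ ((!true && false) = true) by decide)]
        rw [ih.1 acc]
        have hcur : ¬ cur.isEmpty = true := by simp [List.isEmpty_iff, h]
        have e : PySem.Chars.split₀.go (c :: rest) cur [] =
            cur.reverse :: PySem.Chars.split₀.go rest [] [] := by
          simp only [PySem.Chars.split₀.go, if_pos hc, if_neg hcur]
          rw [go_acc rest [] [cur.reverse]]; simp
        rw [e]; simp
      · have hcf : PySem.Chars.isspace c = false := by simp [hc]
        rw [List.foldl_cons, hcf]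
        rw [if_neg (show ¬ ((!false && false) = true) by decide)]
        rw [ih.2 acc (c :: cur) (by simp)]
        have e : PySem.Chars.split₀.go (c :: rest) cur [] =
            PySem.Chars.split₀.go rest (c :: cur) [] := by
          simp [PySem.Chars.split₀.go, hcf]
        rw [e]

-- A's fold ignores the range elements: only the length of the iterated list matters
theorem foldA_len_congr (ws : List (List Char)) (l₁ l₂ : List Int)
    (h : l₁.length = l₂.length) : ∀ st : List Char × Int,
    l₁.foldl (fun (st : List Char × Int) _i =>
      (st.1 ++ [(PySem.List.pyGet? ((PySem.List.pyGet? ws st.2).getD []) 0).getD ' '],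
       st.2 + 1)) st
    = l₂.foldl (fun (st : List Char × Int) _i =>
      (st.1 ++ [(PySem.List.pyGet? ((PySem.List.pyGet? ws st.2).getD []) 0).getD ' '],
       st.2 + 1)) st := by
  induction l₁ generalizing l₂ with
  | nil => cases l₂ <;> simp_all
  | cons a l₁ ih =>
    cases l₂ with
    | nil => simp at h
    | cons b l₂ => intro st; simpa using ih l₂ (by simpa using h) _

-- A's counter loop collects the heads of the words
theorem foldA_heads (ws₂ : List (List Char)) : ∀ (ws₁ : List (List Char)) (acc : List Char),
    (∀ w ∈ ws₂, w ≠ []) →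
    (ws₂.foldl (fun (st : List Char × Int) _i =>
      (st.1 ++ [(PySem.List.pyGet? ((PySem.List.pyGet? (ws₁ ++ ws₂) st.2).getD []) 0).getD ' '],
       st.2 + 1)) (acc, (ws₁.length : Int))).1
    = acc ++ ws₂.map List.headI := by
  induction ws₂ with
  | nil => simp
  | cons w ws₂ ih =>
    intro ws₁ acc hne
    have hget : PySem.List.pyGet? (ws₁ ++ w :: ws₂) (ws₁.length : Int) = some w :=
      PySem.List.pyGet?_append_length ws₁ ws₂ w
    have hw : w ≠ [] := hne w (by simp)
    have hhead : (PySem.List.pyGet? w 0).getD ' ' = w.headI := by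
      cases w with
      | nil => exact absurd rfl hw
      | cons a t => simp
    simp only [List.foldl_cons, hget, Option.getD_some, hhead]
    have hlen : ((ws₁.length : Int) + 1) = ((ws₁ ++ [w]).length : Int) := by
      simp
    have hassoc : ws₁ ++ w :: ws₂ = (ws₁ ++ [w]) ++ ws₂ := by simp
    have := ih (ws₁ ++ [w]) (acc ++ [w.headI]) (fun v hv => hne v (by simp [hv]))
    rw [hlen, hassoc]
    rw [this]; simp

-- ===== VERDICT (by name: the statement is the Claim_ definition above) =====
theorem pegaStr_spec : Claim_equal_pegaStr := by
  intro str _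
  unfold Spec_pegaStr pegaStr pegaStr_alt
  set s := str.toList with hs
  set ws := PySem.Chars.split₀ s with hws
  have hrange : (PySem.List.pyRange 0 (ws.length : Int) 1).length
      = (ws.map (fun _ => (0:Int))).length := by
    simp [PySem.List.length_pyRange_one]
  have hA := foldA_len_congr ws _ (ws.map (fun _ => (0:Int))) hrange (([] : List Char), 0)
  have hfoldmap : (ws.map (fun _ => (0:Int))).foldl (fun (st : List Char × Int) _i =>
      (st.1 ++ [(PySem.List.pyGet? ((PySem.List.pyGet? ws st.2).getD []) 0).getD ' '],
       st.2 + 1)) (([] : List Char), 0)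
    = ws.foldl (fun (st : List Char × Int) _i =>
      (st.1 ++ [(PySem.List.pyGet? ((PySem.List.pyGet? ws st.2).getD []) 0).getD ' '],
       st.2 + 1)) (([] : List Char), 0) := by rw [List.foldl_map]
  have hne : ∀ w ∈ ws, w ≠ [] := by
    intro w hw
    exact words_ne s [] [] (by simp) w (by simpa [hws, PySem.Chars.split₀] using hw)
  have hheads := foldA_heads ws [] [] hne
  simp only [List.nil_append, List.length_nil, Nat.cast_zero] at hheads
  have hB := (scanB s).1 []
  simp only [List.nil_append] at hB
  simp only [hA, hfoldmap, hB]
  rw [hheads, hws]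
  rfl
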